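/- GENERATED by farm/worked/mk_tree_copies.py from farm/worked/ldexp/Proof.lean (a worked proof of the farm's unit `ldexp`,
   accepted by the verdict) — do not edit. -/
import Vorbis.Spec.Units.ldexp

open X86 X86.User Asan Vorbis

set_option maxRecDepth 4000
set_option maxHeartbeats 16000000

/-- `ldexp` satisfies its contract. Three ranges of `n` (signed comparisons of `edi`): in range — one call of `two_to`; above 1023
/ below -1022 — a first call of `two_to`, the clamp (three sub-paths), the call of `two_to(n)`. After every call: `v_after_call`,
then the two stack slots the rest needs (the return address, the saved rbx) carried over the callee's footprint (`u_frame`). The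
spilled double at `[rsp]` is opaque: its reads are never resolved. -/
theorem Vorbis.Spec.Worked.ldexp_ok : Vorbis.Spec.ldexp.Statement := by
  intro Lay hLay μ hμ u₀ hcode h2 others frames u ret he hpre
  v_entry he
  have h2' := h2 others frames
  have hsh : ShadowPre others frames u := hpre
  u_walk hcode [hμ.vendor] span [Vorbis.L.textLo, Vorbis.L.textHi] side (v_side)
  case call_inv => v_inv
  case call_inv => v_inv
  case call_inv => v_inv
  case pre_1022a6 =>
    show ShadowPre others frames s_1022a6
    refine hsh.callee ?_ ?_ ?_ ?_
    · v_untouched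
    · rw [w_rsp]
      u_omega
    · rw [w_rsp]
      u_omega
    · rw [w_rsp]
      u_omega
  case pre_102264 =>
    show ShadowPre others frames s_102264
    refine hsh.callee ?_ ?_ ?_ ?_
    · v_untouched
    · rw [w_rsp]
      u_omega
    · rw [w_rsp]
      u_omega
    · rw [w_rsp]
      u_omega
  case pre_102219 =>
    show ShadowPre others frames s_102219
    refine hsh.callee ?_ ?_ ?_ ?_
    · v_untouched
    · rw [w_rsp]
      u_omega
    · rw [w_rsp]
      u_omega
    · rw [w_rsp]
      u_omega
  · -- -1022 ≤ n ≤ 1023: after the only call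
    v_after_call w_rsp_1022a6 w_mem_1022a6
    have hs0 : UInt64.ofNat (s_1022a6r.mem.readLE (u.reg .rsp) 8) = ret := by
      u_frame he_retAddr
    have hs1 : UInt64.ofNat (s_1022a6r.mem.readLE (u.reg .rsp - 8) 8) = u.reg .rbx := by
      have h0 : (((u.mem.writeLE (u.reg Reg.rsp - 8) 8 (UInt64.toNat (u.reg Reg.rbx))).writeLE (u.reg Reg.rsp - 16) 8
          x_102205.toNat).writeLE (u.reg Reg.rsp - 24) 8 1057451).readLE (u.reg .rsp - 8) 8 = (u.reg .rbx).toNat := by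
        u_read
      have h1 := Mem.readLE_frame (ν := s_1022a6r.mem) h0 (by u_eqon) (by u_omega)
      rw [h1]
      exact UInt64.ofNat_toNat
    u_walk hcode [hμ.vendor] span [Vorbis.L.textLo, Vorbis.L.textHi] side (v_side)
    refine ReachVia.done ?_
    v_returned
    show ShadowUntouched u.mem s_1022b5.mem
    v_untouched
  · -- after the first call at 102264H: one, two or three more steps of the clamp, then the call of `two_to(n)` at 1022a6H
    v_after_call w_rsp_102264 w_mem_102264
    have w_same1 := w_same
    have hs0 : UInt64.ofNat (s_102264r.mem.readLE (u.reg .rsp) 8) = ret := by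
      u_frame he_retAddr
    have hs1 : UInt64.ofNat (s_102264r.mem.readLE (u.reg .rsp - 8) 8) = u.reg .rbx := by
      have h0 : (((u.mem.writeLE (u.reg Reg.rsp - 8) 8 (UInt64.toNat (u.reg Reg.rbx))).writeLE (u.reg Reg.rsp - 16) 8
          x_102205.toNat).writeLE (u.reg Reg.rsp - 24) 8 1057385).readLE (u.reg .rsp - 8) 8 = (u.reg .rbx).toNat := by
        u_read
      have h1 := Mem.readLE_frame (ν := s_102264r.mem) h0 (by u_eqon) (by u_omega)
      rw [h1]
      exact UInt64.ofNat_toNat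
    u_walk hcode [hμ.vendor] span [Vorbis.L.textLo, Vorbis.L.textHi] side (v_side)
    case call_inv => v_inv
    case call_inv => v_inv
    case call_inv => v_inv
    case pre_1022a6 =>
      show ShadowPre others frames s_1022a6
      refine hsh.callee ?_ ?_ ?_ ?_
      · v_untouched
      · rw [w_rsp]
        u_omega
      · rw [w_rsp]
        u_omega
      · rw [w_rsp]
        u_omega
    case pre_1022a6 =>
      show ShadowPre others frames s_1022a6
      refine hsh.callee ?_ ?_ ?_ ?_
      · v_untouched
      · rw [w_rsp]
        u_omega
      · rw [w_rsp]
        u_omega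
      · rw [w_rsp]
        u_omega
    case pre_1022a6 =>
      show ShadowPre others frames s_1022a6
      refine hsh.callee ?_ ?_ ?_ ?_
      · v_untouched
      · rw [w_rsp]
        u_omega
      · rw [w_rsp]
        u_omega
      · rw [w_rsp]
        u_omega
    all_goals (
      v_after_call w_rsp_1022a6 w_mem_1022a6
      have hs0' : UInt64.ofNat (s_1022a6r.mem.readLE (u.reg .rsp) 8) = ret := by
        u_frame hs0
      have hs1' : UInt64.ofNat (s_1022a6r.mem.readLE (u.reg .rsp - 8) 8) = u.reg .rbx := by
        u_frame hs1
      u_walk hcode [hμ.vendor] span [Vorbis.L.textLo, Vorbis.L.textHi] side (v_side)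
      refine ReachVia.done ?_
      v_returned
      show ShadowUntouched u.mem s_1022b5.mem
      v_untouched
      )
  · -- after the first call at 102219H: one, two or three more steps of the clamp, then the call of `two_to(n)` at 1022a6H
    v_after_call w_rsp_102219 w_mem_102219
    have w_same1 := w_same
    have hs0 : UInt64.ofNat (s_102219r.mem.readLE (u.reg .rsp) 8) = ret := by
      u_frame he_retAddr
    have hs1 : UInt64.ofNat (s_102219r.mem.readLE (u.reg .rsp - 8) 8) = u.reg .rbx := by
      have h0 : (((u.mem.writeLE (u.reg Reg.rsp - 8) 8 (UInt64.toNat (u.reg Reg.rbx))).writeLE (u.reg Reg.rsp - 16) 8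
          x_102205.toNat).writeLE (u.reg Reg.rsp - 24) 8 1057310).readLE (u.reg .rsp - 8) 8 = (u.reg .rbx).toNat := by
        u_read
      have h1 := Mem.readLE_frame (ν := s_102219r.mem) h0 (by u_eqon) (by u_omega)
      rw [h1]
      exact UInt64.ofNat_toNat
    u_walk hcode [hμ.vendor] span [Vorbis.L.textLo, Vorbis.L.textHi] side (v_side)
    case call_inv => v_inv
    case call_inv => v_inv
    case call_inv => v_inv
    case pre_1022a6 =>
      show ShadowPre others frames s_1022a6
      refine hsh.callee ?_ ?_ ?_ ?_
      · v_untouched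
      · rw [w_rsp]
        u_omega
      · rw [w_rsp]
        u_omega
      · rw [w_rsp]
        u_omega
    case pre_1022a6 =>
      show ShadowPre others frames s_1022a6
      refine hsh.callee ?_ ?_ ?_ ?_
      · v_untouched
      · rw [w_rsp]
        u_omega
      · rw [w_rsp]
        u_omega
      · rw [w_rsp]
        u_omega
    case pre_1022a6 =>
      show ShadowPre others frames s_1022a6
      refine hsh.callee ?_ ?_ ?_ ?_
      · v_untouched
      · rw [w_rsp]
        u_omega
      · rw [w_rsp]
        u_omega
      · rw [w_rsp]
        u_omega
    all_goals (
      v_after_call w_rsp_1022a6 w_mem_1022a6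
      have hs0' : UInt64.ofNat (s_1022a6r.mem.readLE (u.reg .rsp) 8) = ret := by
        u_frame hs0
      have hs1' : UInt64.ofNat (s_1022a6r.mem.readLE (u.reg .rsp - 8) 8) = u.reg .rbx := by
        u_frame hs1
      u_walk hcode [hμ.vendor] span [Vorbis.L.textLo, Vorbis.L.textHi] side (v_side)
      refine ReachVia.done ?_
      v_returned
      show ShadowUntouched u.mem s_1022b5.mem
      v_untouched
      )
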